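-- pv_equiv track=rewrite | github.com/microsoft/Trace | examples/textgrad_examples/evals/textgrad_solution_optimization.py | backfill
-- ===== SOURCE A (Python) =====
-- def backfill(regret, maxlen):
--     filled_regret = []
--     for i in range(maxlen):
--         if i < len(regret):
--             filled_regret.append(regret[i])
--         else:
--             filled_regret.append(regret[-1])
--     return filled_regret
-- ===== SOURCE B (Python) =====
-- def backfill(regret, maxlen):
--     n = max(maxlen, 0)
--     result = list(regret[:n])
--     if len(result) < n:
--         result += [regret[-1]] * (n - len(result))
--     return result
-- ===== Notes on version B (the rewrite author's own statement) =====
-- stated objective: simpler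
-- what changed: Replaces the per-index loop with its in-loop branch by two bulk operations: one slice copy of the prefix and one replication fill of the last element, evaluated only when padding is needed.
import Mathlib
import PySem

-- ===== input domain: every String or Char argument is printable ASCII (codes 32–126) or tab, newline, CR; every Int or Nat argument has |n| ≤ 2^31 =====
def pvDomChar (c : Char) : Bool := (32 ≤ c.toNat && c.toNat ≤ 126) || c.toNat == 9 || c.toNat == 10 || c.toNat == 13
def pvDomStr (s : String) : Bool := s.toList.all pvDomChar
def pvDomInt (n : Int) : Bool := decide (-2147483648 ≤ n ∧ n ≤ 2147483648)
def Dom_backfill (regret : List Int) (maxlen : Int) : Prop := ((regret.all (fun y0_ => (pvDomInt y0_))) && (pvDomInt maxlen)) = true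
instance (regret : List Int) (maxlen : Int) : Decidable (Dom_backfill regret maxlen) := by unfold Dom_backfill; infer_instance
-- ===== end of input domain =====

-- B replaces the per-index loop (branching on every i) by a bulk slice copy plus a replication fill; objective: simpler.


-- ===== PORT A =====
-- for i in range(maxlen): append regret[i] if i < len(regret) else regret[-1]
def backfill (regret : List Int) (maxlen : Int) : List Int :=
  (PySem.List.pyRange 0 maxlen 1).foldl
    (fun acc i =>
      acc ++ [if i < (regret.length : Int) then PySem.List.pyGetD regret i 0
              else PySem.List.pyGetD regret (-1) 0]) []

-- ===== PORT B =====
-- n = max(maxlen, 0); result = regret[:n]; pad with [regret[-1]] * (n - len(result)) if short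
def backfill_alt (regret : List Int) (maxlen : Int) : List Int :=
  let n := max maxlen 0
  let result := PySem.List.slice regret none (some n)
  if (result.length : Int) < n then
    result ++ List.replicate (n - (result.length : Int)).toNat (PySem.List.pyGetD regret (-1) 0)
  else
    result

-- ===== PRECONDITION & SPEC =====
-- Pre_ excludes exactly the inputs where the Python raises IndexError (regret[-1] on an empty list): both A and B raise there.
def Pre_backfill (regret : List Int) (maxlen : Int) : Prop := regret ≠ [] ∨ maxlen ≤ 0
instance (regret : List Int) (maxlen : Int) : Decidable (Pre_backfill regret maxlen) := by unfold Pre_backfill; infer_instance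
def pvWitness_backfill : List Int × Int := ([1, 2], 5)

def Spec_backfill (regret : List Int) (maxlen : Int) (out : List Int) : Prop := out = backfill_alt regret maxlen
instance (regret : List Int) (maxlen : Int) (out : List Int) : Decidable (Spec_backfill regret maxlen out) := by unfold Spec_backfill; infer_instance

-- ===== CLAIM (what is proved, stated in full; the proofs are below) =====
def Claim_equal_backfill : Prop := ∀ (regret : List Int) (maxlen : Int), Dom_backfill regret maxlen → Pre_backfill regret maxlen → Spec_backfill regret maxlen (backfill regret maxlen)

-- ===== LEMMAS AND PROOFS =====

-- A's loop body as a function of the index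
def bfBody (regret : List Int) (i : Int) : Int :=
  if i < (regret.length : Int) then PySem.List.pyGetD regret i 0
  else PySem.List.pyGetD regret (-1) 0

-- characterisation of A's loop: map of bfBody over range n = truncated prefix ++ padding with the last element
theorem bfMap_eq (regret : List Int) (h : regret ≠ []) (n : Nat) :
    (List.range n).map (fun k : Nat => bfBody regret (k : Int))
      = regret.take n ++ List.replicate (n - regret.length) (regret.getLast h) := by
  induction n with
  | zero => simp
  | succ n ih =>
    rw [List.range_succ, List.map_append, ih, List.map_singleton]
    by_cases hlt : n < regret.length
    · have h1 : (n : Int) < (regret.length : Int) := by exact_mod_cast hlt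
      have h2 : n + 1 - regret.length = 0 := by omega
      have h3 : n - regret.length = 0 := by omega
      rw [List.take_add_one, List.getElem?_eq_getElem hlt]
      simp only [bfBody, if_pos h1, h2, h3, List.replicate_zero, List.append_nil,
        Option.toList_some, PySem.List.pyGetD_natCast,
        List.getD_eq_getElem regret 0 hlt]
    · have h1 : ¬ ((n : Int) < (regret.length : Int)) := by
        intro hc; exact hlt (by exact_mod_cast hc)
      have h2 : n + 1 - regret.length = (n - regret.length) + 1 := by omega
      have h3 : regret.take (n + 1) = regret.take n := by
        rw [List.take_of_length_le (by omega), List.take_of_length_le (by omega)]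
      rw [h3, h2, List.replicate_succ']
      simp [bfBody, h1, PySem.List.pyGetD_neg_one regret 0 h, List.append_assoc]

theorem backfill_eq_map (regret : List Int) (maxlen : Int) :
    backfill regret maxlen
      = (List.range maxlen.toNat).map (fun k : Nat => bfBody regret (k : Int)) := by
  unfold backfill
  rw [PySem.List.foldl_append_singleton_eq_map, PySem.List.pyRange_one, List.map_map]
  simp [bfBody, Function.comp]

theorem backfill_spec' (regret : List Int) (maxlen : Int)
    (hpre : Pre_backfill regret maxlen) :
    backfill regret maxlen = backfill_alt regret maxlen := by
  simp only [backfill_alt]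
  by_cases hm : maxlen ≤ 0
  · have h0 : maxlen.toNat = 0 := by omega
    have hmax : max maxlen 0 = 0 := by omega
    rw [backfill_eq_map, h0, hmax]
    simp [PySem.List.slice_to (b := (0 : Int)) (by omega)]
  · have h : regret ≠ [] := by
      rcases hpre with h | h
      · exact h
      · omega
    have hmax : max maxlen 0 = maxlen := by omega
    rw [backfill_eq_map, bfMap_eq regret h maxlen.toNat, hmax,
      PySem.List.slice_to regret (b := maxlen) (by omega)]
    have hlen : (regret.take maxlen.toNat).length = min maxlen.toNat regret.length := by
      simp
    by_cases hle : maxlen.toNat ≤ regret.length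
    · have h2 : maxlen.toNat - regret.length = 0 := by omega
      have h3 : ¬ (((regret.take maxlen.toNat).length : Int) < maxlen) := by
        rw [hlen]; omega
      rw [if_neg h3]
      simp [h2]
    · have h3 : (((regret.take maxlen.toNat).length : Int) < maxlen) := by
        rw [hlen]; omega
      have h4 : regret.take maxlen.toNat = regret :=
        List.take_of_length_le (by omega)
      rw [if_pos h3, h4]
      have h5 : (maxlen - (regret.length : Int)).toNat = maxlen.toNat - regret.length := by
        omega
      rw [h5, PySem.List.pyGetD_neg_one regret 0 h]

-- ===== VERDICT (by name: the statement is the Claim_ definition above) =====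
theorem backfill_spec : Claim_equal_backfill := by
  intro regret maxlen _ hpre
  unfold Spec_backfill
  exact backfill_spec' regret maxlen hpre
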